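-- pv_equiv track=rewrite | github.com/LASER-WOLF/CantusAeterni | game.py | fill_empty_space
-- ===== SOURCE A (Python) =====
-- FILL_CHAR = "ƒ"
--
-- def fill_empty_space(line, length, char = None, centered = False):
--   if not char:
--     char = FILL_CHAR
--   for n in range(length):
--     if centered and n < length / 2:
--       line = char + line
--     else:
--       line += char
--   return line
-- ===== SOURCE B (Python) =====
-- FILL_CHAR = "ƒ"
--
-- def fill_empty_space(line, length, char = None, centered = False):
--   # Closed form: compute the prefix/suffix split directly, no per-character loop.
--   if not char:
--     char = FILL_CHAR
--   prefix = (length + 1) // 2 if centered else 0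
--   suffix = length - prefix
--   return char * prefix + line + char * suffix
-- ===== Notes on version B (the rewrite author's own statement) =====
-- stated objective: alternative
-- what changed: Replaced the per-character loop with a branch and repeated string concatenation by a closed-form split: prefix = (length+1)//2 when centered else 0, suffix = length - prefix, then one string multiplication on each side.
import Mathlib
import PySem

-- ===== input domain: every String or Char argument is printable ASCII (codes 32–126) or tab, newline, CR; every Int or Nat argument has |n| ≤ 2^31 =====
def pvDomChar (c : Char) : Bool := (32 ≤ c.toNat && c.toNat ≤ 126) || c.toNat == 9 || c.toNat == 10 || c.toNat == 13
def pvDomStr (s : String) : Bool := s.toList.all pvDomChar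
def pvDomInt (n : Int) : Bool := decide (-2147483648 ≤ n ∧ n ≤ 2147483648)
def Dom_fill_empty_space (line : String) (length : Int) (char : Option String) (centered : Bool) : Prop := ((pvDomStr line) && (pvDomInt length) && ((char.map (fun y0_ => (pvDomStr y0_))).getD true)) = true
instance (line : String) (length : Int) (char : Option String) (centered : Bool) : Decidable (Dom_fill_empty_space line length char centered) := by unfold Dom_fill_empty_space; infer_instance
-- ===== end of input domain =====

-- B replaces A's per-character loop of concatenations by a closed-form prefix/suffix split
-- built with string repetition (objective: alternative).

-- ===== PORT A =====
-- 'if not char: char = FILL_CHAR' — falsy means None or ""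
def pvChar (char : Option String) : String :=
  match char with
  | none => "ƒ"
  | some s => if s = "" then "ƒ" else s

-- 'n < length / 2' is Python float division; for |length| ≤ 2^31 the double is exact,
-- so on integers the test is exactly 2*n < length.
def fill_empty_space (line : String) (length : Int) (char : Option String) (centered : Bool) : String :=
  let c := pvChar char
  (PySem.List.pyRange 0 length 1).foldl
    (fun acc n => if centered && decide (2 * n < length) then c ++ acc else acc ++ c) line

-- ===== PORT B =====
-- Python's 'char * k' (empty for k ≤ 0)
def pvStrMul (c : String) (k : Int) : String := String.join (List.replicate k.toNat c)

def fill_empty_space_alt (line : String) (length : Int) (char : Option String) (centered : Bool) : String :=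
  let c := pvChar char
  let prefix_ := if centered then PySem.Int.floordiv (length + 1) 2 else 0
  let suffix_ := length - prefix_
  pvStrMul c prefix_ ++ line ++ pvStrMul c suffix_

-- ===== PRECONDITION & SPEC =====
def Spec_fill_empty_space (line : String) (length : Int) (char : Option String) (centered : Bool) (out : String) : Prop := out = fill_empty_space_alt line length char centered
instance (line : String) (length : Int) (char : Option String) (centered : Bool) (out : String) : Decidable (Spec_fill_empty_space line length char centered out) := by unfold Spec_fill_empty_space; infer_instance

-- ===== CLAIM (what is proved, stated in full; the proofs are below) =====
def Claim_equal_fill_empty_space : Prop := ∀ (line : String) (length : Int) (char : Option String) (centered : Bool), Dom_fill_empty_space line length char centered → Spec_fill_empty_space line length char centered (fill_empty_space line length char centered)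

-- ===== LEMMAS AND PROOFS =====

theorem pvStrMul_zero (c : String) : pvStrMul c 0 = "" := rfl

theorem pvStrMul_nonpos (c : String) (k : Int) (hk : k ≤ 0) : pvStrMul c k = "" := by
  unfold pvStrMul
  rw [Int.toNat_of_nonpos hk]
  rfl

theorem strJoin_foldl (l : List String) (s : String) :
    List.foldl (fun r t => r ++ t) s l = s ++ List.foldl (fun r t => r ++ t) "" l := by
  induction l generalizing s with
  | nil => simp [List.foldl, String.append_empty]
  | cons a t ih =>
      simp only [List.foldl]
      rw [ih (s ++ a), ih ("" ++ a), String.empty_append, String.append_assoc]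

theorem pvStrMul_succ (c : String) (k : Nat) :
    pvStrMul c ((k : Int) + 1) = c ++ pvStrMul c (k : Int) := by
  unfold pvStrMul
  have h : ((k : Int) + 1).toNat = k + 1 := by omega
  rw [h, Int.toNat_natCast, List.replicate_succ]
  simp only [String.join, List.foldl]
  rw [String.empty_append]
  exact strJoin_foldl _ c

theorem pvStrMul_comm (c : String) (k : Nat) :
    c ++ pvStrMul c (k : Int) = pvStrMul c (k : Int) ++ c := by
  induction k with
  | zero => simp [pvStrMul_zero, String.append_empty, String.empty_append]
  | succ n ih =>
      rw [show ((n + 1 : Nat) : Int) = (n : Int) + 1 by push_cast; ring, pvStrMul_succ,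
        String.append_assoc, ← ih]

theorem pvStrMul_succ' (c : String) (k : Nat) :
    pvStrMul c ((k : Int) + 1) = pvStrMul c (k : Int) ++ c := by
  rw [pvStrMul_succ]
  exact pvStrMul_comm c k

-- the non-centered loop: pure appending
theorem fes_loopF (c line : String) (m : Nat) :
    (PySem.List.pyRange 0 (m : Int) 1).foldl (fun acc _ => acc ++ c) line
      = line ++ pvStrMul c (m : Int) := by
  induction m with
  | zero =>
      rw [PySem.List.pyRange_one_eq_nil (by norm_num)]
      simp [List.foldl, pvStrMul_zero, String.append_empty]
  | succ n ih =>
      rw [show ((n + 1 : Nat) : Int) = (n : Int) + 1 by push_cast; ring,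
        PySem.List.pyRange_one_succ_right (by positivity), List.foldl_append, ih]
      simp only [List.foldl]
      rw [pvStrMul_succ', String.append_assoc]

-- the centered loop: the first ceil(len/2) iterations prepend, the rest append
theorem fes_loopT (c line : String) (len : Int) (m : Nat) (hm : (m : Int) ≤ len) :
    (PySem.List.pyRange 0 (m : Int) 1).foldl
        (fun acc n => if 2 * n < len then c ++ acc else acc ++ c) line
      = pvStrMul c (min (m : Int) (PySem.Int.floordiv (len + 1) 2)) ++ line ++
        pvStrMul c ((m : Int) - min (m : Int) (PySem.Int.floordiv (len + 1) 2)) := by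
  have hq := PySem.Int.floordiv_mul_add_mod (len + 1) 2
  have hr0 := PySem.Int.mod_nonneg (len + 1) (by norm_num : (0:Int) < 2)
  have hr1 := PySem.Int.mod_lt (len + 1) (by norm_num : (0:Int) < 2)
  set q := PySem.Int.floordiv (len + 1) 2 with hqdef
  induction m with
  | zero =>
      rw [PySem.List.pyRange_one_eq_nil (by norm_num)]
      have h0 : min (0 : Int) q = 0 := by omega
      simp [List.foldl, h0, pvStrMul_zero, String.append_empty, String.empty_append]
  | succ n ih =>
      have hn : (n : Int) ≤ len := by push_cast at hm ⊢; omega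
      rw [show ((n + 1 : Nat) : Int) = (n : Int) + 1 by push_cast; ring,
        PySem.List.pyRange_one_succ_right (by positivity), List.foldl_append, ih hn]
      simp only [List.foldl]
      by_cases hlt : 2 * (n : Int) < len
      · have h1 : min ((n : Int)) q = (n : Int) := by omega
        have h2 : min ((n : Int) + 1) q = (n : Int) + 1 := by omega
        rw [if_pos hlt, h1, h2]
        simp only [sub_self, pvStrMul_zero, String.append_empty]
        rw [pvStrMul_succ, String.append_assoc]
      · have h1 : min ((n : Int)) q = q := by omega
        have h2 : min ((n : Int) + 1) q = q := by omega
        rw [if_neg hlt, h1, h2]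
        rw [show (n : Int) + 1 - q = (((n : Int) - q).toNat : Int) + 1 by omega,
          pvStrMul_succ',
          show (((n : Int) - q).toNat : Int) = (n : Int) - q by omega,
          String.append_assoc, String.append_assoc]

-- ===== VERDICT (by name: the statement is the Claim_ definition above) =====
theorem fill_empty_space_spec : Claim_equal_fill_empty_space := by
  intro line length char centered _
  unfold Spec_fill_empty_space fill_empty_space fill_empty_space_alt
  set c := pvChar char with hc
  have hq := PySem.Int.floordiv_mul_add_mod (length + 1) 2
  have hr0 := PySem.Int.mod_nonneg (length + 1) (by norm_num : (0:Int) < 2)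
  have hr1 := PySem.Int.mod_lt (length + 1) (by norm_num : (0:Int) < 2)
  set q := PySem.Int.floordiv (length + 1) 2 with hqdef
  cases centered with
  | false =>
      simp only [Bool.false_and, Bool.false_eq_true, if_false, Bool.false_eq_true]
      rcases le_or_gt length 0 with hneg | hpos
      · rw [PySem.List.pyRange_one_eq_nil hneg]
        simp only [List.foldl]
        rw [pvStrMul_nonpos c (length - 0) (by omega), pvStrMul_zero]
        rw [String.empty_append, String.append_empty]
      · have hm : ((length.toNat : Int)) = length := by omega
        have H := fes_loopF c line length.toNat
        rw [hm] at H
        rw [H, pvStrMul_zero, String.empty_append, sub_zero]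
  | true =>
      simp only [Bool.true_and, decide_eq_true_eq, if_true]
      rcases le_or_gt length 0 with hneg | hpos
      · rw [PySem.List.pyRange_one_eq_nil hneg]
        simp only [List.foldl]
        rw [pvStrMul_nonpos c q (by omega), pvStrMul_nonpos c (length - q) (by omega)]
        rw [String.empty_append, String.append_empty]
      · have hm : ((length.toNat : Int)) = length := by omega
        have H := fes_loopT c line length length.toNat (by omega)
        rw [hm] at H
        have hminq : min length q = q := by omega
        rw [hminq] at H
        exact H
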